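-- pv_equiv track=rewrite | github.com/grahamiancummins/gdblocks | portfors/clust.py | contained_in
-- ===== SOURCE A (Python) =====
-- def contained_in(ft, ft2):
-- 	inft2 = set()
-- 	for f in ft2:
-- 		inft2 = inft2.union(f)
-- 	new = []
-- 	for f in ft:
-- 		new.append(sorted(list(inft2.intersection(f))))
-- 	return new
-- ===== SOURCE B (Python) =====
-- def contained_in(ft, ft2):
--     su = sorted({x for f in ft2 for x in f})
--     return [[x for x in su if x in f] for f in ft]
-- ===== Notes on version B (the rewrite author's own statement) =====
-- stated objective: simpler
-- what changed: B sorts the union once up front and builds each row by filtering that single sorted list by membership, instead of A's per-row set-intersection followed by a per-row sort.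
import Mathlib
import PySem

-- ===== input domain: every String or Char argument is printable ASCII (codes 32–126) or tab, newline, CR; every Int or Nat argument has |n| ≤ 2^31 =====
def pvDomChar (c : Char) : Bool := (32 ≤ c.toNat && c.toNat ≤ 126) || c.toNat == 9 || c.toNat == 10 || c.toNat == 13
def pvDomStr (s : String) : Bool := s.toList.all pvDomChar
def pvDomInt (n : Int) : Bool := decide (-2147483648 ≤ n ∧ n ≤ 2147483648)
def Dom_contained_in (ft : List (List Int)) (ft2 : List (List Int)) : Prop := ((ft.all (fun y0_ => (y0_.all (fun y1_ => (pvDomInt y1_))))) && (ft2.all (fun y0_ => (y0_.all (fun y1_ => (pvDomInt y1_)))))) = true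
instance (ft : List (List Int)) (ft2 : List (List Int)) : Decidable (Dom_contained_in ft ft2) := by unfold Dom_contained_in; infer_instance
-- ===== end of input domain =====

-- B sorts the union once up front and filters that one sorted list per row,
-- instead of A's per-row set-intersection followed by a per-row sort (objective: simpler).

-- ===== PORT A =====
def contained_in (ft : List (List Int)) (ft2 : List (List Int)) : List (List Int) :=
  let inft2 : PySem.Set Int := ft2.foldl (fun s f => PySem.Set.union s f) PySem.Set.empty
  ft.foldl (fun new f => new ++ [PySem.List.sorted (PySem.Set.inter inft2 f) (fun x => x)]) []

-- ===== PORT B =====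
def contained_in_alt (ft : List (List Int)) (ft2 : List (List Int)) : List (List Int) :=
  let su := PySem.List.sorted (PySem.Set.ofList ft2.flatten) (fun x => x)
  ft.map (fun f => su.filter (fun x => f.contains x))

-- ===== PRECONDITION & SPEC =====
def Spec_contained_in (ft : List (List Int)) (ft2 : List (List Int)) (out : List (List Int)) : Prop := out = contained_in_alt ft ft2
instance (ft : List (List Int)) (ft2 : List (List Int)) (out : List (List Int)) : Decidable (Spec_contained_in ft ft2 out) := by unfold Spec_contained_in; infer_instance

-- ===== CLAIM (what is proved, stated in full; the proofs are below) =====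
def Claim_equal_contained_in : Prop := ∀ (ft : List (List Int)) (ft2 : List (List Int)), Dom_contained_in ft ft2 → Spec_contained_in ft ft2 (contained_in ft ft2)

-- ===== LEMMAS AND PROOFS =====

-- A's running union of ft2 is the set of ft2's concatenated elements.
theorem union_foldl_eq_ofList_flatten (ft2 : List (List Int)) :
    ft2.foldl (fun s f => PySem.Set.union s f) PySem.Set.empty
      = PySem.Set.ofList ft2.flatten := by
  suffices h : ∀ (l : List (List Int)) (s : PySem.Set Int),
      l.foldl (fun s f => PySem.Set.union s f) s = l.flatten.foldl PySem.Set.add s by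
    simpa [PySem.Set.ofList_eq_foldl, PySem.Set.empty] using h ft2 PySem.Set.empty
  intro l
  induction l with
  | nil => intro s; rfl
  | cons f t ih =>
      intro s
      simp only [List.flatten_cons, List.foldl_cons, List.foldl_append]
      rw [show PySem.Set.union s f = List.foldl PySem.Set.add s f from rfl, ih]

-- Per row: sorted intersection with a set = filter of the sorted set.
theorem sorted_inter_eq_filter_sorted (xs f : List Int) :
    PySem.List.sorted (PySem.Set.inter (PySem.Set.ofList xs) f) (fun x => x)
      = (PySem.List.sorted (PySem.Set.ofList xs) (fun x => x)).filter (fun x => f.contains x) := by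
  apply PySem.List.sorted_eq_of_perm_of_pairwise_lt
  · exact List.Perm.filter _ (PySem.List.sorted_perm (PySem.Set.ofList xs) (fun x => x) false)
  · exact List.Pairwise.filter _ (PySem.List.sorted_ofList_pairwise_lt xs)

-- ===== VERDICT (by name: the statement is the Claim_ definition above) =====
theorem contained_in_spec : Claim_equal_contained_in := by
  intro ft ft2 _
  show contained_in ft ft2 = contained_in_alt ft ft2
  unfold contained_in contained_in_alt
  rw [union_foldl_eq_ofList_flatten, PySem.List.foldl_append_singleton_eq_map]
  exact List.map_congr_left fun f _ => sorted_inter_eq_filter_sorted ft2.flatten f
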